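-- pv_equiv track=rewrite | github.com/bky373/algorithm-solving | by-python/boj/1439-뒤집기.py | solve
-- ===== SOURCE A (Python) =====
-- def solve(data):
--     cnts = [0, 0]
--
--     if data[0] == '0':
--         cnts[1] += 1
--     else:
--         cnts[0] += 1
--
--     for i in range(len(data) - 1):
--         if data[i] != data[i + 1]:
--             if data[i + 1] == '0':
--                 cnts[1] += 1
--             else:
--                 cnts[0] += 1
--
--     return min(cnts)
-- ===== SOURCE B (Python) =====
-- def solve(data):
--     # pattern-frequency identities instead of a stateful scan:
--     # blocks of equal chars = transitions + 1; a run of k zeros has k '0'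
--     # chars and k-1 '00' pairs, so #zero-blocks = #'0' - #'00'
--     pairs = list(zip(data, data[1:]))
--     transitions = sum(a != b for a, b in pairs)
--     zeros = sum(c == '0' for c in data)
--     doubled = sum(a == b == '0' for a, b in pairs)
--     return min(zeros - doubled, transitions + 1 - (zeros - doubled))
-- ===== Notes on version B (the rewrite author's own statement) =====
-- stated objective: alternative
-- what changed: A runs one stateful scan keeping two per-class block counters updated at each boundary; B counts three pattern frequencies (adjacent transitions, '0' characters, '00' pairs) and derives both block counts arithmetically via zero-blocks = zeros - doubled and one-blocks = transitions + 1 - zero-blocks.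
import Mathlib
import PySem

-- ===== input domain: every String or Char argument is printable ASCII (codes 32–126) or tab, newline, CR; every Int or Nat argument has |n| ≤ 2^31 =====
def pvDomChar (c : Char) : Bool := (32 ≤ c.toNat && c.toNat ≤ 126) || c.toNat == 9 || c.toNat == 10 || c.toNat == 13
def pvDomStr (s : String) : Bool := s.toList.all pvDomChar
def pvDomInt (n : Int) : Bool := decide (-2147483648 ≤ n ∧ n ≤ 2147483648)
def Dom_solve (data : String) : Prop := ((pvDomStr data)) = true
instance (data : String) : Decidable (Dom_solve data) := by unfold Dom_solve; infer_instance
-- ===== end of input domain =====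

-- B replaces A's stateful two-counter boundary scan by pattern-frequency
-- identities: zero-blocks = #'0' chars - #'00' pairs, one-blocks =
-- transitions + 1 - zero-blocks (objective: alternative, same cost).

-- ===== PORT A =====
-- one pass over adjacent indices, two counters; data[0] is safe under Pre_ (nonempty)
def solve (data : String) : Int :=
  let l := data.toList
  let cnts : Int × Int :=
    if PySem.List.pyGetD l 0 ' ' = '0' then (0, 1) else (1, 0)
  let cnts :=
    (PySem.List.pyRange 0 ((l.length : Int) - 1) 1).foldl
      (fun c i =>
        if PySem.List.pyGetD l i ' ' ≠ PySem.List.pyGetD l (i + 1) ' ' then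
          if PySem.List.pyGetD l (i + 1) ' ' = '0' then (c.1, c.2 + 1)
          else (c.1 + 1, c.2)
        else c) cnts
  min cnts.1 cnts.2

-- ===== PORT B =====
-- count three pattern frequencies over the string and its adjacent pairs,
-- then derive both block counts arithmetically
def solve_alt (data : String) : Int :=
  let l := data.toList
  let pairs := l.zip (l.drop 1)
  let transitions : Int := (pairs.countP (fun p => p.1 != p.2) : Int)
  let zeros : Int := (l.countP (fun c => c == '0') : Int)
  let doubled : Int := (pairs.countP (fun p => p.1 == p.2 && p.2 == '0') : Int)
  min (zeros - doubled) (transitions + 1 - (zeros - doubled))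

-- ===== PRECONDITION & SPEC =====
-- Pre_ excludes exactly the empty string, on which A raises IndexError from data[0].
def Pre_solve (data : String) : Prop := data ≠ ""
instance (data : String) : Decidable (Pre_solve data) := by unfold Pre_solve; infer_instance
def pvWitness_solve : String := "01"

def Spec_solve (data : String) (out : Int) : Prop := out = solve_alt data
instance (data : String) (out : Int) : Decidable (Spec_solve data out) := by unfold Spec_solve; infer_instance

-- ===== CLAIM (what is proved, stated in full; the proofs are below) =====
def Claim_equal_solve : Prop := ∀ (data : String), Dom_solve data → Pre_solve data → Spec_solve data (solve data)

-- ===== LEMMAS AND PROOFS =====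

theorem foldPair (l : List Char) (r : List Int) (init : Int × Int) :
    r.foldl
      (fun c i =>
        if PySem.List.pyGetD l i ' ' ≠ PySem.List.pyGetD l (i + 1) ' ' then
          if PySem.List.pyGetD l (i + 1) ' ' = '0' then (c.1, c.2 + 1)
          else (c.1 + 1, c.2)
        else c) init
    = (init.1 + (r.countP (fun i => decide (PySem.List.pyGetD l i ' ' ≠ PySem.List.pyGetD l (i + 1) ' ') && !decide (PySem.List.pyGetD l (i + 1) ' ' = '0')) : Int),
       init.2 + (r.countP (fun i => decide (PySem.List.pyGetD l i ' ' ≠ PySem.List.pyGetD l (i + 1) ' ') && decide (PySem.List.pyGetD l (i + 1) ' ' = '0')) : Int)) := by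
  induction r generalizing init with
  | nil => simp
  | cons x xs ih =>
    rw [List.foldl_cons, ih]
    simp only [List.countP_cons]
    by_cases h1 : PySem.List.pyGetD l x ' ' ≠ PySem.List.pyGetD l (x + 1) ' ' <;>
      by_cases h2 : PySem.List.pyGetD l (x + 1) ' ' = '0' <;>
        simp [h1, h2, Prod.ext_iff] <;> (try split_ifs) <;> push_cast <;> omega

theorem range_shift (n : Int) :
    PySem.List.pyRange 1 n 1 = (PySem.List.pyRange 0 (n - 1) 1).map (· + 1) := by
  simp only [PySem.List.pyRange_one, List.map_map, sub_zero]
  refine List.map_congr_left ?_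
  intro k _
  simp [add_comm]

theorem pyGetD_cons_pos (x : Char) (xs : List Char) (m : Int) (h : 1 ≤ m) :
    PySem.List.pyGetD (x :: xs) m ' ' = PySem.List.pyGetD xs (m - 1) ' ' := by
  obtain ⟨n, rfl⟩ : ∃ n : Nat, m = (n : Int) := ⟨m.toNat, by omega⟩
  have h2 : (n : Int) - 1 = ((n - 1 : Nat) : Int) := by omega
  rw [h2, PySem.List.pyGetD_natCast, PySem.List.pyGetD_natCast]
  cases n with
  | zero => omega
  | succ k => simp

-- the index range of adjacent pairs, realised as the zip of the list with its tail
theorem pairs_eq : ∀ (l : List Char),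
    (PySem.List.pyRange 0 ((l.length : Int) - 1) 1).map
      (fun i => (PySem.List.pyGetD l i ' ', PySem.List.pyGetD l (i + 1) ' '))
    = l.zip (l.drop 1) := by
  intro l
  induction l with
  | nil => simp [PySem.List.pyRange_one_eq_nil]
  | cons x xs ih =>
    cases xs with
    | nil => simp [PySem.List.pyRange_one_eq_nil]
    | cons y ys =>
      have hn : (0 : Int) < ((x :: y :: ys).length : Int) - 1 := by
        simp
      rw [PySem.List.pyRange_one_cons hn, List.map_cons]
      have hshift : ((x :: y :: ys).length : Int) - 1 - 1 + 1 = ((x :: y :: ys).length : Int) - 1 := by ring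
      rw [show (0 : Int) + 1 = 1 by ring, range_shift, List.map_map]
      have hlen : ((x :: y :: ys).length : Int) - 1 - 1 = ((y :: ys).length : Int) - 1 := by
        simp
      rw [hlen]
      have hmap : ((PySem.List.pyRange 0 (((y :: ys).length : Int) - 1) 1).map
            ((fun i => (PySem.List.pyGetD (x :: y :: ys) i ' ', PySem.List.pyGetD (x :: y :: ys) (i + 1) ' ')) ∘ (· + 1)))
          = (PySem.List.pyRange 0 (((y :: ys).length : Int) - 1) 1).map
            (fun i => (PySem.List.pyGetD (y :: ys) i ' ', PySem.List.pyGetD (y :: ys) (i + 1) ' ')) := by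
        refine List.map_congr_left ?_
        intro i hi
        have h0 : 0 ≤ i := (PySem.List.mem_pyRange_one.mp hi).1
        simp only [Function.comp]
        rw [pyGetD_cons_pos x (y :: ys) (i + 1) (by omega),
            pyGetD_cons_pos x (y :: ys) (i + 1 + 1) (by omega)]
        have e1 : i + 1 - 1 = i := by ring
        have e2 : i + 1 + 1 - 1 = i + 1 := by ring
        rw [e1, e2]
      rw [hmap, ih]
      simp [PySem.List.pyGetD_zero_cons, pyGetD_cons_pos x (y :: ys) 1 le_rfl,
            PySem.List.pyGetD_zero_cons]

theorem countP_pairs (l : List Char) (Q : Char → Char → Bool) :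
    (PySem.List.pyRange 0 ((l.length : Int) - 1) 1).countP
        (fun i => Q (PySem.List.pyGetD l i ' ') (PySem.List.pyGetD l (i + 1) ' '))
      = (l.zip (l.drop 1)).countP (fun p => Q p.1 p.2) := by
  rw [← pairs_eq, List.countP_map]
  rfl

-- boundary counters, recursively over the list: total transitions,
-- transitions into '0', transitions into a non-'0' character
def cntT : Char → List Char → Nat
  | _, [] => 0
  | c, y :: ys => (if c ≠ y then 1 else 0) + cntT y ys

def intoZ : Char → List Char → Nat
  | _, [] => 0
  | c, y :: ys => (if c ≠ y ∧ y = '0' then 1 else 0) + intoZ y ys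

def intoO : Char → List Char → Nat
  | _, [] => 0
  | c, y :: ys => (if c ≠ y ∧ y ≠ '0' then 1 else 0) + intoO y ys

theorem zipT : ∀ (xs : List Char) (c : Char),
    ((c :: xs).zip xs).countP (fun p => p.1 != p.2) = cntT c xs := by
  intro xs
  induction xs with
  | nil => intro c; simp [cntT]
  | cons y ys ih =>
    intro c
    simp only [List.zip_cons_cons, List.countP_cons, cntT, ih y]
    by_cases h : c = y <;> simp [h, bne] <;> omega

theorem zipZ : ∀ (xs : List Char) (c : Char),
    ((c :: xs).zip xs).countP
        (fun p => decide (p.1 ≠ p.2) && decide (p.2 = '0')) = intoZ c xs := by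
  intro xs
  induction xs with
  | nil => intro c; simp [intoZ]
  | cons y ys ih =>
    intro c
    simp only [List.zip_cons_cons, List.countP_cons, intoZ, ih y]
    by_cases h : c = y <;> by_cases h0 : y = '0' <;> simp [h, h0] <;> omega

theorem zipO : ∀ (xs : List Char) (c : Char),
    ((c :: xs).zip xs).countP
        (fun p => decide (p.1 ≠ p.2) && !decide (p.2 = '0')) = intoO c xs := by
  intro xs
  induction xs with
  | nil => intro c; simp [intoO]
  | cons y ys ih =>
    intro c
    simp only [List.zip_cons_cons, List.countP_cons, intoO, ih y]
    by_cases h : c = y <;> by_cases h0 : y = '0' <;> simp [h, h0] <;> omega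

def cntEq0 : Char → List Char → Nat
  | _, [] => 0
  | c, y :: ys => (if c = y ∧ y = '0' then 1 else 0) + cntEq0 y ys

theorem zipE : ∀ (xs : List Char) (c : Char),
    ((c :: xs).zip xs).countP (fun p => p.1 == p.2 && p.2 == '0') = cntEq0 c xs := by
  intro xs
  induction xs with
  | nil => intro c; simp [cntEq0]
  | cons y ys ih =>
    intro c
    simp only [List.zip_cons_cons, List.countP_cons, cntEq0, ih y]
    by_cases h : c = y <;> by_cases h0 : y = '0' <;> simp [h, h0] <;> omega

-- the two boundary classes partition all boundaries
theorem sumTrans : ∀ (xs : List Char) (c : Char),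
    intoZ c xs + intoO c xs = cntT c xs := by
  intro xs
  induction xs with
  | nil => intro c; simp [intoZ, intoO, cntT]
  | cons y ys ih =>
    intro c
    simp only [intoZ, intoO, cntT]
    have h2 := ih y
    by_cases h : c = y <;> by_cases h0 : y = '0' <;> simp [h, h0] at h2 ⊢ <;> omega

-- a run of k zeros has k '0' characters and k-1 '00' pairs, so
-- zero-blocks + '00'-pairs = '0'-characters
theorem zeroRuns : ∀ (xs : List Char) (c : Char),
    (if c = '0' then 1 else 0) + intoZ c xs + cntEq0 c xs
      = (c :: xs).countP (fun d => d == '0') := by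
  intro xs
  induction xs with
  | nil => intro c; by_cases h : c = '0' <;> simp [intoZ, cntEq0, h]
  | cons y ys ih =>
    intro c
    have hih := ih y
    simp only [intoZ, cntEq0, List.countP_cons] at hih ⊢
    by_cases h : c = y <;> by_cases h0 : y = '0' <;> by_cases hc : c = '0' <;>
      simp_all <;> omega

theorem solve_eq_alt (data : String) (hpre : Pre_solve data) :
    solve data = solve_alt data := by
  have hne : data ≠ "" := hpre
  unfold solve solve_alt
  dsimp only
  set l := data.toList with hldef
  have hlne : l ≠ [] := by simp [hldef, String.toList_eq_nil_iff, hne]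
  obtain ⟨c, xs, hl⟩ : ∃ c xs, l = c :: xs := by
    cases h : l with
    | nil => exact absurd h hlne
    | cons a b => exact ⟨a, b, rfl⟩
  rw [hl]
  rw [foldPair,
      countP_pairs (c :: xs) (fun a b => decide (a ≠ b) && !decide (b = '0')),
      countP_pairs (c :: xs) (fun a b => decide (a ≠ b) && decide (b = '0'))]
  simp only [List.drop_one, List.tail_cons]
  rw [zipT xs c, zipZ xs c, zipO xs c, zipE xs c]
  have hsum := sumTrans xs c
  have hruns := zeroRuns xs c
  by_cases hc : c = '0'
  · rw [if_pos (by rw [hc]; simp [PySem.List.pyGetD_zero_cons])]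
    rw [if_pos hc] at hruns
    dsimp only
    omega
  · rw [if_neg (by simpa [PySem.List.pyGetD_zero_cons] using hc)]
    rw [if_neg hc] at hruns
    dsimp only
    omega

-- ===== VERDICT (by name: the statement is the Claim_ definition above) =====
theorem solve_spec : Claim_equal_solve := by
  intro data _ hpre
  unfold Spec_solve
  exact solve_eq_alt data hpre
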